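-- pv_equiv track=rewrite | github.com/c2acsbal/vasar | sopping.py | sori
-- ===== SOURCE A (Python) =====
-- def sori(tartalom):
--     ennyi = 0
--     eddigennyi = 1
--     for i in range(len(tartalom)-1):
--         if tartalom[i] == "0" and tartalom[i+1] == "0":
--             eddigennyi +=1
--         else:
--             if ennyi < eddigennyi:
--                 ennyi = eddigennyi
--             eddigennyi = 1
--
--     return ennyi
-- ===== SOURCE B (Python) =====
-- def sori(tartalom):
--     if len(tartalom) < 2:
--         return 0
--     k = 1
--     while "0" * (k + 1) in tartalom:
--         k += 1
--     return k
-- ===== Notes on version B (the rewrite author's own statement) =====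
-- stated objective: simpler
-- what changed: Replaces the stateful index pair-scan (running counter plus flushed maximum) by growing k while a block of k+1 consecutive zeros is still a substring; the interpreted per-character loop disappears into built-in substring search.
-- intended difference: On strings of length >= 2 whose trailing run of zeros has length >= 2 and is strictly longer than every zero-run that is followed by a non-zero character, A never flushes that final run and reports only the earlier runs (e.g. 0 on '0000'), while B reports the full length of the longest zero-run, the intended value. — e.g. on sori("0000"): A returns 0, B returns 4
import Mathlib
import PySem

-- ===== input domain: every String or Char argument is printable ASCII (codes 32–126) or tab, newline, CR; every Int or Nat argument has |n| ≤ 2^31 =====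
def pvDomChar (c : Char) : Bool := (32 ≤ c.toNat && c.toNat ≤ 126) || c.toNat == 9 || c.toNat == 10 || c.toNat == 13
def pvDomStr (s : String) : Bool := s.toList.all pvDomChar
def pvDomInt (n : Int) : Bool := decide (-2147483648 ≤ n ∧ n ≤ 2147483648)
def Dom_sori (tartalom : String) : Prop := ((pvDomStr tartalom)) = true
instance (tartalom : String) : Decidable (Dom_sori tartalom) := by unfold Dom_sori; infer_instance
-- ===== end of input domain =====

-- B computes the longest zero-run by growing k while "0"*(k+1) is still a substring (simpler);
-- A's scan never flushes a zero-run that reaches the end of the string — stated below as D_sori.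

-- ===== PORT A =====
-- for i in range(len(t)-1): if t[i]=='0' and t[i+1]=='0': eddigennyi += 1
--                           else: if ennyi < eddigennyi: ennyi = eddigennyi; eddigennyi = 1
def sori (tartalom : String) : Int :=
  let cs := tartalom.toList
  let st :=
    (PySem.List.pyRange 0 (PySem.Str.len tartalom - 1) 1).foldl
      (fun (st : Int × Int) i =>
        if PySem.List.pyGetD cs i ' ' = '0' ∧ PySem.List.pyGetD cs (i + 1) ' ' = '0' then
          (st.1, st.2 + 1)
        else
          (if st.1 < st.2 then st.2 else st.1, 1))
      (0, 1)
  st.1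

-- ===== PORT B =====
-- the while loop of Source B: k = 1; while "0"*(k+1) in tartalom: k += 1; return k
-- (Python's 'sub in str' is contiguous-substring membership = List.IsInfix: exact)
def bloop (cs : List Char) (k : Nat) : Nat :=
  if h : List.replicate (k + 1) '0' <:+: cs then bloop cs (k + 1) else k
termination_by cs.length + 1 - k
decreasing_by
  have := h.length_le
  simp [List.length_replicate] at this
  omega

def sori_alt (tartalom : String) : Int :=
  if PySem.Str.len tartalom < 2 then 0 else (bloop tartalom.toList 1 : Int)

-- ===== PRECONDITION & SPEC =====
-- input-inspection helpers for D_sori (lengths of zero-runs in the input string)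
-- length of the leading '0'-run
def lz : List Char → Nat
  | [] => 0
  | c :: t => if c = '0' then lz t + 1 else 0

-- longest '0'-run = max of lz over all suffixes
def runMax : List Char → Nat
  | [] => 0
  | c :: t => max (lz (c :: t)) (runMax t)

-- the characters before the trailing '0'-run, and the length of that trailing run
def pyRstrip0 (cs : List Char) : List Char :=
  (cs.reverse.dropWhile (· = '0')).reverse

def tzN (cs : List Char) : Nat :=
  (cs.reverse.takeWhile (· = '0')).length

-- On strings of length ≥ 2 whose trailing run of zeros has length ≥ 2 and is strictly longer
-- than every zero-run that is followed by a non-zero character, A never flushes that final run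
-- and reports only the earlier runs (e.g. 0 on "0000"), while B reports the full length of the
-- longest zero-run, the intended value.
def D_sori (tartalom : String) : Prop :=
  2 ≤ tartalom.toList.length ∧ 2 ≤ tzN tartalom.toList ∧
    runMax (pyRstrip0 tartalom.toList) < tzN tartalom.toList
instance (tartalom : String) : Decidable (D_sori tartalom) := by unfold D_sori; infer_instance

def Spec_sori (tartalom : String) (out : Int) : Prop := ¬ D_sori tartalom → out = sori_alt tartalom
instance (tartalom : String) (out : Int) : Decidable (Spec_sori tartalom out) := by
  unfold Spec_sori; infer_instance

def pvDiffWitness_sori : String := "0000"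
def pvDiffWitnessOut_sori : Int × Int := (0, 4)

-- ===== CLAIM (what is proved, stated in full; the proofs are below) =====
def Claim_unchanged_sori : Prop := ∀ (tartalom : String), Dom_sori tartalom → Spec_sori tartalom (sori tartalom)
def Claim_changed_sori : Prop := Dom_sori (pvDiffWitness_sori) ∧ D_sori (pvDiffWitness_sori) ∧ sori (pvDiffWitness_sori) = pvDiffWitnessOut_sori.1 ∧ sori_alt (pvDiffWitness_sori) = pvDiffWitnessOut_sori.2 ∧ pvDiffWitnessOut_sori.1 ≠ pvDiffWitnessOut_sori.2
def Claim_exact_sori : Prop := ∀ (tartalom : String), Dom_sori tartalom → D_sori tartalom → sori tartalom ≠ sori_alt tartalom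

-- ===== LEMMAS AND PROOFS =====

-- A's flushed maximum alone, entering with current-run counter d
def Phi : List Char → Int → Int
  | [], _ => 0
  | [_], _ => 0
  | a :: b :: t, d =>
    if a = '0' ∧ b = '0' then Phi (b :: t) (d + 1) else max d (Phi (b :: t) 1)

-- A's scan as structural recursion over the character list
def Arec : List Char → Int × Int → Int × Int
  | [], st => st
  | [_], st => st
  | a :: b :: t, st =>
    Arec (b :: t)
      (if a = '0' ∧ b = '0' then (st.1, st.2 + 1) else (if st.1 < st.2 then st.2 else st.1, 1))

theorem foldl_range_eq_Arec (cs : List Char) (st : Int × Int) :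
    (List.range (cs.length - 1)).foldl
      (fun (st : Int × Int) j =>
        if cs.getD j ' ' = '0' ∧ cs.getD (j + 1) ' ' = '0' then (st.1, st.2 + 1)
        else (if st.1 < st.2 then st.2 else st.1, 1)) st = Arec cs st := by
  induction cs generalizing st with
  | nil => simp [Arec]
  | cons a t ih =>
    cases t with
    | nil => simp [Arec]
    | cons b t' =>
      have h1 : (a :: b :: t').length - 1 = t'.length + 1 := by simp
      rw [h1, List.range_succ_eq_map, List.foldl_cons, List.foldl_map]
      simp only [List.getD_cons_succ, List.getD_cons_zero, Nat.succ_eq_add_one]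
      rw [Arec]
      exact ih _

theorem sori_eq_foldl_range (s : String) :
    sori s = ((List.range (s.toList.length - 1)).foldl
      (fun (st : Int × Int) j =>
        if s.toList.getD j ' ' = '0' ∧ s.toList.getD (j + 1) ' ' = '0' then (st.1, st.2 + 1)
        else (if st.1 < st.2 then st.2 else st.1, 1)) (0, 1)).1 := by
  unfold sori
  rw [PySem.Str.len_eq]
  rcases Nat.eq_zero_or_pos s.toList.length with h | h
  · rw [h]
    rw [show ((0 : Nat) : Int) - 1 = -1 from rfl]
    rw [PySem.List.pyRange_one_eq_nil (by omega)]
    simp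
  · have h2 : (s.toList.length : Int) - 1 = ((s.toList.length - 1 : Nat) : Int) := by omega
    rw [h2, PySem.List.pyRange_zero_nat]
    show (List.foldl (fun (st : Int × Int) i =>
        if PySem.List.pyGetD s.toList i ' ' = '0' ∧ PySem.List.pyGetD s.toList (i + 1) ' ' = '0' then
          (st.1, st.2 + 1)
        else (if st.1 < st.2 then st.2 else st.1, 1)) (0, 1)
        ((List.range (s.toList.length - 1)).map (fun k : Nat => (k : Int)))).1 = _
    rw [List.foldl_map]
    have hf : (fun (st : Int × Int) (j : Nat) =>
        if PySem.List.pyGetD s.toList (j : Int) ' ' = '0' ∧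
            PySem.List.pyGetD s.toList ((j : Int) + 1) ' ' = '0' then (st.1, st.2 + 1)
        else (if st.1 < st.2 then st.2 else st.1, 1))
        = (fun (st : Int × Int) (j : Nat) =>
        if s.toList.getD j ' ' = '0' ∧ s.toList.getD (j + 1) ' ' = '0' then (st.1, st.2 + 1)
        else (if st.1 < st.2 then st.2 else st.1, 1)) := by
      funext st j
      rw [show ((j : Int) + 1) = ((j + 1 : Nat) : Int) by push_cast; ring]
      simp only [PySem.List.pyGetD_natCast]
    rw [hf]

theorem Phi_nonneg (cs : List Char) (d : Int) (hd : 1 ≤ d) : 0 ≤ Phi cs d := by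
  induction cs generalizing d with
  | nil => simp [Phi]
  | cons a t ih =>
    cases t with
    | nil => simp [Phi]
    | cons b t' =>
      rw [Phi]
      split
      · exact ih (d + 1) (by omega)
      · have := ih 1 le_rfl
        omega

theorem Arec_fst_eq (cs : List Char) (e d : Int) (he : 0 ≤ e) (hd : 1 ≤ d) :
    (Arec cs (e, d)).1 = max e (Phi cs d) := by
  induction cs generalizing e d with
  | nil => simp [Arec, Phi]; omega
  | cons a t ih =>
    cases t with
    | nil => simp [Arec, Phi]; omega
    | cons b t' =>
      rw [Arec, Phi]
      split
      · exact ih e (d + 1) he (by omega)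
      · have h1 := ih (if e < d then d else e) 1 (by omega) le_rfl
        have h2 := Phi_nonneg (b :: t') 1 le_rfl
        rw [h1]
        omega

theorem rstrip0_nil_iff (cs : List Char) : pyRstrip0 cs = [] ↔ ∀ c ∈ cs, c = '0' := by
  unfold pyRstrip0
  rw [List.reverse_eq_nil_iff, List.dropWhile_eq_nil_iff]
  constructor
  · intro h c hc
    have := h c (by simp [hc])
    simpa using this
  · intro h c hc
    simp only [decide_eq_true_eq]
    exact h c (by simpa using hc)

theorem rstrip0_cons (a : Char) (t : List Char) :
    pyRstrip0 (a :: t) = if a = '0' ∧ pyRstrip0 t = [] then [] else a :: pyRstrip0 t := by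
  unfold pyRstrip0
  rw [List.reverse_cons, List.dropWhile_append]
  split
  · rename_i h
    rw [List.isEmpty_iff] at h
    split
    · rename_i h2
      simp [h2.1]
    · rename_i h2
      have ht : (List.dropWhile (fun x => decide (x = '0')) t.reverse).reverse = [] := by
        simp [h]
      rw [ht]
      have ha : ¬ a = '0' := fun hc => h2 ⟨hc, ht⟩
      simp [List.dropWhile, ha]
  · rename_i h
    rw [List.isEmpty_iff] at h
    split
    · rename_i h2
      exact absurd (by simpa using h2.2) h
    · simp

theorem runMax_cons_eq (cs : List Char) (h : cs ≠ []) :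
    runMax cs = max (lz cs) (runMax cs.tail) := by
  cases cs with
  | nil => simp at h
  | cons c t => rfl

-- the heart: closed form of A's flushed maximum
theorem Phi_closed (cs : List Char) (d : Int) (hd : 1 ≤ d) :
    Phi cs d =
      if cs.length < 2 ∨ pyRstrip0 cs = [] then 0
      else
        max (d - 1 + (max (lz (pyRstrip0 cs)) 1 : Nat))
          (max 1 (runMax (pyRstrip0 cs).tail : Int)) := by
  induction cs generalizing d with
  | nil => simp [Phi]
  | cons a t ih =>
    cases t with
    | nil =>
      have h1 : ([a] : List Char).length < 2 := by simp
      rw [Phi, if_pos (Or.inl h1)]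
    | cons b t' =>
      have hlen : ¬ (a :: b :: t').length < 2 := by simp
      by_cases hab : a = '0' ∧ b = '0'
      · rw [Phi, if_pos hab, ih (d + 1) (by omega)]
        by_cases hr' : pyRstrip0 (b :: t') = []
        · have hA : pyRstrip0 (a :: b :: t') = [] := by
            rw [rstrip0_cons]; exact if_pos ⟨hab.1, hr'⟩
          rw [if_pos (Or.inr hr'), if_pos (Or.inr hA)]
        · have hA : pyRstrip0 (a :: b :: t') = a :: pyRstrip0 (b :: t') := by
            rw [rstrip0_cons]; exact if_neg (fun h => hr' h.2)
          have hb' : pyRstrip0 (b :: t') = b :: pyRstrip0 t' := by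
            rw [rstrip0_cons]
            exact if_neg (fun h => hr' (by rw [rstrip0_cons]; exact if_pos h))
          have ht' : t' ≠ [] := by
            intro h
            subst h
            simp [pyRstrip0, List.dropWhile, hab.2] at hb'
          have hlen' : ¬ (b :: t').length < 2 := by
            cases t' with
            | nil => exact absurd rfl ht'
            | cons _ _ => simp
          rw [if_neg (fun h => h.elim hlen' hr'),
            if_neg (fun h => h.elim hlen (fun hh => by rw [hA] at hh; cases hh))]
          have hlzpos : 1 ≤ lz (pyRstrip0 (b :: t')) := by
            rw [hb', lz, if_pos hab.2]; omega
          have hrm := runMax_cons_eq _ hr'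
          rw [hA]
          simp only [List.tail_cons]
          have hlz : lz (a :: pyRstrip0 (b :: t')) = lz (pyRstrip0 (b :: t')) + 1 := by
            rw [lz, if_pos hab.1]
          rw [hlz, hrm]
          omega
      · rw [Phi, if_neg hab, ih 1 le_rfl]
        by_cases hr' : pyRstrip0 (b :: t') = []
        · have hb0 : b = '0' := (rstrip0_nil_iff _).mp hr' b (by simp)
          have ha : ¬ a = '0' := fun h => hab ⟨h, hb0⟩
          have hA : pyRstrip0 (a :: b :: t') = a :: pyRstrip0 (b :: t') := by
            rw [rstrip0_cons]; exact if_neg (fun h => ha h.1)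
          rw [if_pos (Or.inr hr'),
            if_neg (fun h => h.elim hlen (fun hh => by rw [hA] at hh; cases hh))]
          rw [hA, hr']
          simp only [List.tail_cons]
          simp [lz, runMax, ha]
          omega
        · have hA : pyRstrip0 (a :: b :: t') = a :: pyRstrip0 (b :: t') := by
            rw [rstrip0_cons]; exact if_neg (fun h => hr' h.2)
          have hb' : pyRstrip0 (b :: t') = b :: pyRstrip0 t' := by
            rw [rstrip0_cons]
            exact if_neg (fun h => hr' (by rw [rstrip0_cons]; exact if_pos h))
          have hlzb : lz (a :: pyRstrip0 (b :: t')) ≤ 1 := by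
            rw [lz]
            split
            · rename_i ha0
              have hb0 : ¬ b = '0' := fun h => hab ⟨ha0, h⟩
              rw [hb', lz, if_neg hb0]
            · omega
          rw [hA]
          cases t' with
          | nil =>
            rw [if_pos (Or.inl (by simp)),
              if_neg (fun h => h.elim hlen (fun hh => (List.cons_ne_nil _ _) hh))]
            simp only [List.tail_cons]
            have hb0 : ¬ b = '0' := by
              intro h
              exact hr' (by simp [pyRstrip0, h])
            have hbv : pyRstrip0 [b] = [b] := by
              simp [pyRstrip0, hb0]
            rw [hbv] at hlzb ⊢
            simp [runMax, lz, hb0] at hlzb ⊢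
            omega
          | cons c t'' =>
            rw [if_neg (fun h => h.elim (by simp) hr'),
              if_neg (fun h => h.elim hlen (fun hh => (List.cons_ne_nil _ _) hh))]
            simp only [List.tail_cons]
            have hrm := runMax_cons_eq _ hr'
            rw [hrm]
            omega

theorem prefix_replicate_of_le_lz (cs : List Char) (k : Nat) (h : k ≤ lz cs) :
    List.replicate k '0' <+: cs := by
  induction cs generalizing k with
  | nil =>
    simp [lz] at h
    subst h
    simp
  | cons c t ih =>
    cases k with
    | zero => simp
    | succ k' =>
      rw [lz] at h
      by_cases hc : c = '0'
      · rw [if_pos hc] at h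
        rw [List.replicate_succ, hc]
        exact List.cons_prefix_cons.mpr ⟨rfl, ih k' (by omega)⟩
      · rw [if_neg hc] at h
        omega

theorem lz_le_of_prefix_replicate (cs : List Char) (k : Nat)
    (h : List.replicate k '0' <+: cs) : k ≤ lz cs := by
  induction cs generalizing k with
  | nil =>
    simp at h
    omega
  | cons c t ih =>
    cases k with
    | zero => omega
    | succ k' =>
      rw [List.replicate_succ, List.cons_prefix_cons] at h
      rw [lz, if_pos h.1.symm]
      have := ih k' h.2
      omega

theorem lz_suffix_le_runMax (cs s : List Char) (h : s <:+ cs) : lz s ≤ runMax cs := by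
  induction cs with
  | nil =>
    rw [List.suffix_nil] at h
    subst h
    simp [lz, runMax]
  | cons c t ih =>
    rcases List.suffix_cons_iff.mp h with h | h
    · subst h
      rw [runMax]
      omega
    · have := ih h
      rw [runMax]
      omega

theorem replicate_infix_iff (cs : List Char) (k : Nat) :
    List.replicate k '0' <:+: cs ↔ k ≤ runMax cs := by
  constructor
  · intro h
    rcases List.infix_iff_prefix_suffix.mp h with ⟨t, hp, hs⟩
    exact le_trans (lz_le_of_prefix_replicate t k hp) (lz_suffix_le_runMax cs t hs)
  · intro h
    induction cs with
    | nil =>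
      rw [runMax] at h
      interval_cases k
      simp
    | cons c t ih =>
      rw [runMax] at h
      by_cases h2 : k ≤ runMax t
      · exact (ih h2).trans (List.suffix_cons c t).isInfix
      · have hk : k ≤ lz (c :: t) := by omega
        exact (prefix_replicate_of_le_lz _ k hk).isInfix

theorem bloop_eq (cs : List Char) (k : Nat) : bloop cs k = max k (runMax cs) := by
  fun_induction bloop with
  | case1 k h ih =>
    have := (replicate_infix_iff _ _).mp h
    omega
  | case2 k h =>
    have h2 : ¬ (k + 1 ≤ runMax cs) := fun hh => h ((replicate_infix_iff _ _).mpr hh)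
    omega

-- decomposition of the input into its body and its trailing zero-run
theorem decomp_eq (cs : List Char) :
    cs = pyRstrip0 cs ++ List.replicate (tzN cs) '0' := by
  unfold pyRstrip0 tzN
  have h1 : (cs.reverse.takeWhile (· = '0')) =
      List.replicate (cs.reverse.takeWhile (· = '0')).length '0' := by
    apply List.eq_replicate_of_mem
    intro c hc
    have := List.mem_takeWhile_imp hc
    simpa using this
  conv_lhs => rw [← cs.reverse_reverse, ← List.takeWhile_append_dropWhile (p := (· = '0'))
    (l := cs.reverse)]
  rw [List.reverse_append]
  congr 1
  conv_lhs => rw [h1]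
  rw [List.reverse_replicate]

theorem rstrip0_getLast (cs : List Char) :
    ∀ c, (pyRstrip0 cs).getLast? = some c → c ≠ '0' := by
  intro c hc
  unfold pyRstrip0 at hc
  rw [List.getLast?_reverse] at hc
  have hd : cs.reverse.dropWhile (· = '0') ≠ [] := by
    intro h0; rw [h0] at hc; simp at hc
  have hh := List.head_dropWhile_not (fun x => decide (x = '0')) hd
  have hceq : (cs.reverse.dropWhile (· = '0')).head hd = c := by
    rw [List.head?_eq_some_head hd] at hc
    exact Option.some.inj hc
  rw [hceq] at hh
  simpa using hh

theorem lz_append_of_exists (xs ys : List Char) (h : ∃ c ∈ xs, c ≠ '0') :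
    lz (xs ++ ys) = lz xs := by
  induction xs with
  | nil => simp at h
  | cons x t ih =>
    by_cases hx : x = '0'
    · have ht : ∃ c ∈ t, c ≠ '0' := by
        rcases h with ⟨c, hc, hc0⟩
        rcases List.mem_cons.mp hc with rfl | hc
        · exact absurd hx hc0
        · exact ⟨c, hc, hc0⟩
      simp only [List.cons_append, lz, if_pos hx, ih ht]
    · simp only [List.cons_append, lz, if_neg hx]

theorem runMax_replicate (k : Nat) : runMax (List.replicate k '0') = k := by
  induction k with
  | zero => simp [runMax]
  | succ n ih =>
    rw [List.replicate_succ, runMax, ih]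
    have hlz : ∀ m, lz (List.replicate m '0') = m := by
      intro m
      induction m with
      | zero => simp [lz]
      | succ p ihp => rw [List.replicate_succ, lz, if_pos rfl, ihp]
    rw [show '0' :: List.replicate n '0' = List.replicate (n + 1) '0' by
      rw [List.replicate_succ], hlz]
    omega

theorem runMax_append_replicate (xs : List Char) (k : Nat)
    (h : ∀ c, xs.getLast? = some c → c ≠ '0') :
    runMax (xs ++ List.replicate k '0') = max (runMax xs) k := by
  induction xs with
  | nil => simp [runMax, runMax_replicate]
  | cons x t ih =>
    cases t with
    | nil =>
      have hx0 : x ≠ '0' := h x (by simp)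
      simp [runMax, runMax_replicate, lz, hx0]
    | cons y u =>
      have hlast : ∀ c, (y :: u).getLast? = some c → c ≠ '0' := by
        intro c hc
        exact h c (by rw [List.getLast?_cons_cons]; exact hc)
      have hmem : ∃ c ∈ x :: y :: u, c ≠ '0' := by
        have hne : (y :: u) ≠ [] := by simp
        refine ⟨(y :: u).getLast hne, ?_, ?_⟩
        · exact List.mem_cons_of_mem _ (List.getLast_mem hne)
        · exact hlast _ (List.getLast?_eq_some_getLast hne)
      have hlz : lz (x :: ((y :: u) ++ List.replicate k '0')) = lz (x :: y :: u) := by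
        simpa using lz_append_of_exists (x :: y :: u) (List.replicate k '0') hmem
      rw [List.cons_append, runMax_cons_eq _ (by simp), List.tail_cons,
          runMax_cons_eq (x :: y :: u) (by simp), List.tail_cons, hlz, ih hlast]
      omega

-- A's closed form: 0 on short or all-zero input, else 1 ⊔ longest zero-run of the body
theorem sori_closed (s : String) :
    sori s = if s.toList.length < 2 ∨ pyRstrip0 s.toList = [] then 0
      else max 1 (runMax (pyRstrip0 s.toList) : Int) := by
  rw [sori_eq_foldl_range, foldl_range_eq_Arec, Arec_fst_eq _ 0 1 le_rfl le_rfl,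
    Phi_closed _ 1 le_rfl]
  split
  · simp
  · rename_i h
    have hne : pyRstrip0 s.toList ≠ [] := fun hc => h (Or.inr hc)
    have hrm := runMax_cons_eq _ hne
    rw [hrm]
    push_cast
    omega

-- B's closed form: 0 on short input, else 1 ⊔ longest zero-run of the whole string
theorem sori_alt_closed (s : String) :
    sori_alt s = if s.toList.length < 2 then 0 else max 1 (runMax s.toList : Int) := by
  unfold sori_alt
  rw [PySem.Str.len_eq]
  by_cases h : s.toList.length < 2
  · rw [if_pos (by exact_mod_cast h), if_pos h]
  · rw [if_neg (by exact_mod_cast h), if_neg h, bloop_eq]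
    push_cast
    omega

theorem runMax_full (s : String) :
    runMax s.toList = max (runMax (pyRstrip0 s.toList)) (tzN s.toList) := by
  conv_lhs => rw [decomp_eq s.toList]
  exact runMax_append_replicate _ _ (rstrip0_getLast _)

theorem rstrip0_nil_len (s : String) (h : pyRstrip0 s.toList = []) :
    tzN s.toList = s.toList.length := by
  have h3 := congrArg List.length (decomp_eq s.toList)
  rw [h] at h3
  simp only [List.nil_append, List.length_replicate] at h3
  omega

-- ===== VERDICT (by name: the statement is the Claim_ definition above) =====
theorem sori_spec : Claim_unchanged_sori := by
  intro s _
  unfold Spec_sori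
  intro hD
  unfold D_sori at hD
  rw [sori_closed, sori_alt_closed]
  by_cases h1 : s.toList.length < 2
  · rw [if_pos (Or.inl h1), if_pos h1]
  · by_cases h2 : pyRstrip0 s.toList = []
    · exfalso
      apply hD
      have htz := rstrip0_nil_len s h2
      refine ⟨by omega, by omega, ?_⟩
      rw [h2]
      simp only [runMax]
      omega
    · rw [if_neg (fun h => h.elim h1 h2), if_neg h1, runMax_full]
      have : ¬ (2 ≤ tzN s.toList ∧ runMax (pyRstrip0 s.toList) < tzN s.toList) := by
        intro h
        exact hD ⟨by omega, h.1, h.2⟩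
      push_cast
      omega

theorem sori_changed : Claim_changed_sori := by
  unfold Claim_changed_sori
  refine ⟨by decide, by decide, by decide, ?_, by decide⟩
  show sori_alt pvDiffWitness_sori = pvDiffWitnessOut_sori.2
  rw [sori_alt_closed]
  decide


theorem sori_tight : Claim_exact_sori := by
  intro s _ hD
  unfold D_sori at hD
  obtain ⟨hlen, htz, hlt⟩ := hD
  rw [sori_closed, sori_alt_closed, runMax_full,
    if_neg (show ¬ s.toList.length < 2 by omega)]
  by_cases h2 : pyRstrip0 s.toList = []
  · rw [if_pos (Or.inr h2), h2]
    simp only [runMax]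
    push_cast
    omega
  · rw [if_neg (fun h => h.elim (fun hh => absurd hh (by omega)) h2)]
    push_cast
    omega
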